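-- pv_equiv track=rewrite | github.com/moonsea12/google-kickstart-2021-round-f | trash_bins.py | closest_bin
-- ===== SOURCE A (Python) =====
-- def closest_bin(index, street):
--     closest_left = len(street)
--     closest_right = len(street)
--     for i in range(index, len(street)):
--         if (street[i] == "1"):
--             closest_right = abs(index - i)
--             break
--     for i in range(index, -1, -1):
--         if (street[i] == "1"):
--             closest_left = abs(index - i)
--             break
--     return min(closest_left, closest_right)
-- ===== SOURCE B (Python) =====
-- def closest_bin(index, street):
--     n = len(street)
--     for d in range(n + 1):
--         r = index + d
--         l = index - d
--         if (r < n and street[r] == "1") or (l >= 0 and street[l] == "1"):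
--             return d
--     return n
-- ===== Notes on version B (the rewrite author's own statement) =====
-- stated objective: alternative
-- what changed: Replaced A's two directional scans (right scan, left scan, then min) by a single outward expansion over the distance d = 0..len(street), returning the first d at which either index-d or index+d holds a '1'; the first hit in distance order is the minimum, so no min() and no second pass are needed.
import Mathlib
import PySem

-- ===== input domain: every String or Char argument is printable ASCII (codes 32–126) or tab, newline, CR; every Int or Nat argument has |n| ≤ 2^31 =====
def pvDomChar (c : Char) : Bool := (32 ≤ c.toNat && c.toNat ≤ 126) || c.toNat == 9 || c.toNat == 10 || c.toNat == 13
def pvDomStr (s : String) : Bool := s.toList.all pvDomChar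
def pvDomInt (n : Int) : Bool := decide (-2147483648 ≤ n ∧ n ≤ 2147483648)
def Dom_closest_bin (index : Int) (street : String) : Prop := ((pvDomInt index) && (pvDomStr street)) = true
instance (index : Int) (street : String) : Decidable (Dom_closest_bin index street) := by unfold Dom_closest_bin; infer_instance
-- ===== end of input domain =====

-- B replaces A's two directional scans + min by one outward expansion over the distance d,
-- returning the first d at which index-d or index+d holds a '1' (alternative decomposition, same cost).


-- ===== PORT A =====
-- one 'for … in range(…): if street[i]=="1": closest = abs(index-i); break' loop;
-- the 'none' branch is Python's IndexError, excluded by Pre_closest_bin.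
def pvScanLoop (cs : List Char) (index : Int) : List Int → Int → Int
  | [], acc => acc
  | i :: rest, acc =>
    match PySem.List.pyGet? cs i with
    | none => acc
    | some c => if c = '1' then |index - i| else pvScanLoop cs index rest acc

def closest_bin (index : Int) (street : String) : Int :=
  let cs := street.toList
  let closest_left : Int := cs.length
  let closest_right : Int := cs.length
  let closest_right := pvScanLoop cs index (PySem.List.pyRange index cs.length 1) closest_right
  let closest_left := pvScanLoop cs index (PySem.List.pyRange index (-1) (-1)) closest_left
  min closest_left closest_right

-- ===== PORT B =====
-- 'for d in range(n+1): if (r < n and street[r]=="1") or (l >= 0 and street[l]=="1"): return d / return n';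
-- street[r] is pyGet? (matches Python's negative indexing; pyGet? = none is Python's IndexError, outside Pre_).
def pvExpandLoop (cs : List Char) (index : Int) (n : Int) : List Int → Int
  | [] => n
  | d :: ds =>
    if (decide (index + d < n) && (PySem.List.pyGet? cs (index + d) == some '1'))
        || (decide (0 ≤ index - d) && (PySem.List.pyGet? cs (index - d) == some '1'))
    then d else pvExpandLoop cs index n ds

def closest_bin_alt (index : Int) (street : String) : Int :=
  let cs := street.toList
  let n : Int := cs.length
  pvExpandLoop cs index n (PySem.List.pyRange 0 (n + 1) 1)

-- ===== PRECONDITION & SPEC =====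
-- Pre_ is exactly the set of inputs on which the Python A returns: outside it (index < -len or
-- index ≥ len, which includes every index on the empty street) A raises IndexError.
def Pre_closest_bin (index : Int) (street : String) : Prop :=
  -(street.toList.length : Int) ≤ index ∧ index < (street.toList.length : Int)
instance (index : Int) (street : String) : Decidable (Pre_closest_bin index street) := by
  unfold Pre_closest_bin; infer_instance

def pvWitness_closest_bin : Int × String := (1, "0010")

def Spec_closest_bin (index : Int) (street : String) (out : Int) : Prop := out = closest_bin_alt index street
instance (index : Int) (street : String) (out : Int) : Decidable (Spec_closest_bin index street out) := by unfold Spec_closest_bin; infer_instance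

-- ===== CLAIM (what is proved, stated in full; the proofs are below) =====
def Claim_equal_closest_bin : Prop := ∀ (index : Int) (street : String), Dom_closest_bin index street → Pre_closest_bin index street → Spec_closest_bin index street (closest_bin index street)

-- ===== LEMMAS AND PROOFS =====

-- pvScanLoop either falls through with acc, or returns |index - i| for some i in the list holding '1'.
theorem pvScanLoop_cases (cs : List Char) (index : Int) (ls : List Int) (acc : Int) :
    pvScanLoop cs index ls acc = acc ∨
      ∃ i ∈ ls, PySem.List.pyGet? cs i = some '1' ∧ pvScanLoop cs index ls acc = |index - i| := by
  induction ls with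
  | nil => exact Or.inl rfl
  | cons i rest ih =>
    simp only [pvScanLoop]
    cases hg : PySem.List.pyGet? cs i with
    | none => exact Or.inl rfl
    | some c =>
      by_cases hc : c = '1'
      · subst hc
        exact Or.inr ⟨i, by simp, hg, by simp⟩
      · simp only [if_neg hc]
        rcases ih with h | ⟨j, hj, hg', he⟩
        · exact Or.inl h
        · exact Or.inr ⟨j, by simp [hj], hg', he⟩

-- right scan from index+d: result is the default or at least d
theorem scanR_ge (cs : List Char) (index d : Int) (hd : 0 ≤ d) :
    pvScanLoop cs index (PySem.List.pyRange (index + d) (cs.length : Int) 1) (cs.length : Int)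
      = (cs.length : Int) ∨
    d ≤ pvScanLoop cs index (PySem.List.pyRange (index + d) (cs.length : Int) 1) (cs.length : Int) := by
  rcases pvScanLoop_cases cs index (PySem.List.pyRange (index + d) (cs.length : Int) 1) (cs.length : Int) with h | ⟨i, hi, _, he⟩
  · exact Or.inl h
  · rw [PySem.List.mem_pyRange_one] at hi
    right; rw [he]
    have : |index - i| = i - index := by rw [abs_sub_comm]; exact abs_of_nonneg (by omega)
    omega

-- left scan from index-d: result is the default, or between d and index
theorem scanL_cases (cs : List Char) (index d : Int) (hd : 0 ≤ d) :
    pvScanLoop cs index (PySem.List.pyRange (index - d) (-1) (-1)) (cs.length : Int)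
      = (cs.length : Int) ∨
    (d ≤ pvScanLoop cs index (PySem.List.pyRange (index - d) (-1) (-1)) (cs.length : Int) ∧
      pvScanLoop cs index (PySem.List.pyRange (index - d) (-1) (-1)) (cs.length : Int) ≤ index) := by
  rcases pvScanLoop_cases cs index (PySem.List.pyRange (index - d) (-1) (-1)) (cs.length : Int) with h | ⟨i, hi, _, he⟩
  · exact Or.inl h
  · rw [PySem.List.mem_pyRange_neg_one] at hi
    right; rw [he]
    have : |index - i| = index - i := abs_of_nonneg (by omega)
    omega

-- the heart: the expansion loop from distance d computes min n (min (right scan from index+d) (left scan from index-d))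
theorem pvExpand_eq_min (cs : List Char) (index : Int)
    (h1 : -(cs.length : Int) ≤ index) (h2 : index < (cs.length : Int)) :
    ∀ (m : Nat) (d : Int), 0 ≤ d → ((cs.length : Int) + 1 - d).toNat = m →
      pvExpandLoop cs index (cs.length : Int) (PySem.List.pyRange d ((cs.length : Int) + 1) 1)
        = min (cs.length : Int)
            (min (pvScanLoop cs index (PySem.List.pyRange (index + d) (cs.length : Int) 1) (cs.length : Int))
                 (pvScanLoop cs index (PySem.List.pyRange (index - d) (-1) (-1)) (cs.length : Int))) := by
  intro m
  induction m with
  | zero =>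
    intro d hd hm
    set n : Int := (cs.length : Int) with hn
    have hdn : n + 1 ≤ d := by omega
    rw [PySem.List.pyRange_one_eq_nil hdn]
    have hR := scanR_ge cs index d hd
    have hL := scanL_cases cs index d hd
    simp only [← hn] at hR hL
    simp only [pvExpandLoop]
    omega
  | succ m ih =>
    intro d hd hm
    set n : Int := (cs.length : Int) with hn
    have hdn : d < n + 1 := by omega
    rw [PySem.List.pyRange_one_cons hdn]
    have ihd : pvExpandLoop cs index n (PySem.List.pyRange (d + 1) (n + 1) 1)
        = min n (min (pvScanLoop cs index (PySem.List.pyRange (index + (d + 1)) n 1) n)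
                     (pvScanLoop cs index (PySem.List.pyRange (index - (d + 1)) (-1) (-1)) n)) := by
      exact ih (d + 1) (by omega) (by omega)
    have hget : ∀ i : Int, -n ≤ i → i < n → ∃ c, PySem.List.pyGet? cs i = some c := by
      intro i hlo hhi
      cases hg : PySem.List.pyGet? cs i with
      | none =>
        rw [PySem.List.pyGet?_eq_none_iff] at hg
        exact absurd ⟨by exact_mod_cast hlo, by exact_mod_cast hhi⟩ hg
      | some c => exact ⟨c, rfl⟩
    -- describe R(d) and L(d) in terms of R(d+1) / L(d+1)
    have hRd : pvScanLoop cs index (PySem.List.pyRange (index + d) n 1) n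
        = if h : index + d < n then
            (if PySem.List.pyGet? cs (index + d) = some '1' then d
             else pvScanLoop cs index (PySem.List.pyRange (index + (d + 1)) n 1) n)
          else n := by
      by_cases hin : index + d < n
      · obtain ⟨c, hc⟩ := hget (index + d) (by omega) hin
        rw [PySem.List.pyRange_one_cons hin]
        simp only [pvScanLoop, hc, dif_pos hin]
        by_cases h1' : c = '1'
        · subst h1'
          simp only [reduceIte]
          rw [abs_sub_comm]; simpa using abs_of_nonneg hd
        · rw [if_neg h1', if_neg (by simp [h1'] : ¬ (some c = some ('1' : Char)))]
          have harg : index + d + 1 = index + (d + 1) := by ring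
          rw [harg]
      · rw [dif_neg hin, PySem.List.pyRange_one_eq_nil (by omega)]
        rfl
    have hLd : pvScanLoop cs index (PySem.List.pyRange (index - d) (-1) (-1)) n
        = if h : 0 ≤ index - d then
            (if PySem.List.pyGet? cs (index - d) = some '1' then d
             else pvScanLoop cs index (PySem.List.pyRange (index - (d + 1)) (-1) (-1)) n)
          else n := by
      by_cases hin : 0 ≤ index - d
      · obtain ⟨c, hc⟩ := hget (index - d) (by omega) (by omega)
        rw [PySem.List.pyRange_neg_one_cons (by omega : (-1 : Int) < index - d)]
        simp only [pvScanLoop, hc, dif_pos hin]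
        by_cases h1' : c = '1'
        · subst h1'
          simp only [reduceIte]
          simpa using abs_of_nonneg hd
        · rw [if_neg h1', if_neg (by simp [h1'] : ¬ (some c = some ('1' : Char)))]
          have harg : index - d - 1 = index - (d + 1) := by ring
          rw [harg]
      · rw [dif_neg hin, PySem.List.pyRange_neg_one_eq_nil (by omega)]
        rfl
    simp only [pvExpandLoop]
    split_ifs with hcond
    · 
      simp only [Bool.or_eq_true, Bool.and_eq_true, decide_eq_true_eq, beq_iff_eq] at hcond
      have hRge := scanR_ge cs index (d + 1) (by omega)
      have hLge := scanL_cases cs index (d + 1) (by omega)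
      rw [← hn] at hRge hLge
      rcases hcond with ⟨hlt, hhit⟩ | ⟨hge, hhit⟩
      · rw [hRd, dif_pos hlt, if_pos hhit]
        rcases scanL_cases cs index d hd with hL | hL <;> rw [← hn] at hL <;> omega
      · rw [hLd, dif_pos hge, if_pos hhit, hRd]
        by_cases hlt : index + d < n
        · rw [dif_pos hlt]
          by_cases hh : PySem.List.pyGet? cs (index + d) = some '1'
          · rw [if_pos hh]; omega
          · rw [if_neg hh]; omega
        · rw [dif_neg hlt]; omega
    · rw [ihd]
      simp only [Bool.or_eq_true, Bool.and_eq_true, decide_eq_true_eq, beq_iff_eq, not_or, not_and_or] at hcond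
      obtain ⟨hr, hl⟩ := hcond
      have hRd' : pvScanLoop cs index (PySem.List.pyRange (index + d) n 1) n
          = pvScanLoop cs index (PySem.List.pyRange (index + (d + 1)) n 1) n := by
        rw [hRd]
        by_cases hlt : index + d < n
        · rcases hr with h | h
          · exact absurd hlt h
          · rw [dif_pos hlt, if_neg h]
        · rw [dif_neg hlt, PySem.List.pyRange_one_eq_nil (by omega)]
          rfl
      have hLd' : pvScanLoop cs index (PySem.List.pyRange (index - d) (-1) (-1)) n
          = pvScanLoop cs index (PySem.List.pyRange (index - (d + 1)) (-1) (-1)) n := by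
        rw [hLd]
        by_cases hge : 0 ≤ index - d
        · rcases hl with h | h
          · exact absurd hge h
          · rw [dif_pos hge, if_neg h]
        · rw [dif_neg hge, PySem.List.pyRange_neg_one_eq_nil (by omega)]
          rfl
      rw [hRd', hLd']

-- ===== VERDICT (by name: the statement is the Claim_ definition above) =====
theorem closest_bin_spec : Claim_equal_closest_bin := by
  intro index street _ hpre
  obtain ⟨h1, h2⟩ := hpre
  unfold Spec_closest_bin closest_bin closest_bin_alt
  set cs := street.toList with hcs
  set n : Int := (cs.length : Int) with hn
  simp only
  have hmain := pvExpand_eq_min cs index h1 h2 ((n + 1 - 0).toNat) 0 le_rfl rfl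
  simp only [add_zero, sub_zero] at hmain
  rw [← hn] at hmain ⊢
  rw [hmain]
  have hR := scanR_ge cs index 0 le_rfl
  have hL := scanL_cases cs index 0 le_rfl
  simp only [add_zero, sub_zero] at hR hL
  rw [← hn] at hR hL
  omega
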